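-- pv_equiv track=rewrite | github.com/madst0614/dawn-srw | scripts/analysis/dawn_srw/dawn_srw_common.py | find_token_index
-- ===== SOURCE A (Python) =====
-- from typing import Any, Dict, Iterable, List, Optional, Sequence, Tuple
--
-- def find_token_index(tokens: Sequence[str], target: Optional[str], default: str = "last") -> int:
--     """Find a token index by token text. Handles BERT ## subwords lightly."""
--     if target is None or target == "":
--         return len(tokens) - 1 if default == "last" else 0
--     target_l = target.lower()
--     stripped = [t.lower().replace("##", "") for t in tokens]
--     for i, t in enumerate(stripped):
--         if t == target_l:
--             return i
--     for i, t in enumerate(stripped):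
--         if target_l in t:
--             return i
--     raise ValueError(f"Could not find target token {target!r} in tokens: {tokens}")
-- ===== SOURCE B (Python) =====
-- def find_token_index(tokens, target, default="last"):
--     if target is None or target == "":
--         return len(tokens) - 1 if default == "last" else 0
--     target_l = target.lower()
--     sub_idx = None
--     for i, t in enumerate(tokens):
--         t = t.lower().replace("##", "")
--         if t == target_l:
--             return i
--         if sub_idx is None and target_l in t:
--             sub_idx = i
--     if sub_idx is not None:
--         return sub_idx
--     raise ValueError(f"Could not find target token {target!r} in tokens: {tokens}")
-- ===== Notes on version B (the rewrite author's own statement) =====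
-- stated objective: alternative
-- what changed: B replaces A's pre-built stripped list and two sequential full scans (exact pass, then substring pass) with a single fused pass that normalizes each token on the fly, returns immediately on an exact match, and remembers only the first substring match for the fallback.
import Mathlib
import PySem

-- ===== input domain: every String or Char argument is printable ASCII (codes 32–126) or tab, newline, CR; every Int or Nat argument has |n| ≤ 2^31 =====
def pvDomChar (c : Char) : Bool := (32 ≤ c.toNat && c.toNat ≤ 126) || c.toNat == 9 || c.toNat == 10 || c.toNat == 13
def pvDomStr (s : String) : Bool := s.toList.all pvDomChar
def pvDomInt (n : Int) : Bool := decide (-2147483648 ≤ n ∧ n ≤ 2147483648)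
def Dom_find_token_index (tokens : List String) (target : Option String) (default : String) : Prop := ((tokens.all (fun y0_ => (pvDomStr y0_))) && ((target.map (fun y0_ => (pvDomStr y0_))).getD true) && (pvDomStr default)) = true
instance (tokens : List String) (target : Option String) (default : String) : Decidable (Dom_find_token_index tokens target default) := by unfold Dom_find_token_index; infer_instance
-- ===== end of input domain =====

-- B fuses A's two sequential scans over a pre-built stripped list into one pass that
-- normalizes tokens on the fly and records the first substring match (objective: alternative).

-- ===== PORT A =====
-- t.lower().replace("##", "")
def pvStripA (t : String) : String := PySem.Str.replace (PySem.Str.lower t) "##" ""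

-- first loop of A: first i with stripped[i] == target_l
def pvScanEq : List String → String → Int → Option Int
  | [], _, _ => none
  | t :: rest, tgt, i => if t = tgt then some i else pvScanEq rest tgt (i + 1)

-- second loop of A: first i with target_l in stripped[i]
def pvScanIn : List String → String → Int → Option Int
  | [], _, _ => none
  | t :: rest, tgt, i => if PySem.Str.isIn tgt t then some i else pvScanIn rest tgt (i + 1)

def find_token_index (tokens : List String) (target : Option String) (default : String) : Int :=
  match target with
  | none => if default = "last" then (tokens.length : Int) - 1 else 0
  | some tg =>
    if tg = "" then (if default = "last" then (tokens.length : Int) - 1 else 0)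
    else
      let target_l := PySem.Str.lower tg
      let stripped := tokens.map pvStripA
      match pvScanEq stripped target_l 0 with
      | some i => i
      | none =>
        match pvScanIn stripped target_l 0 with
        | some i => i
        | none => -1  -- Python raises ValueError here; excluded by Pre_find_token_index

-- ===== PORT B =====
-- B's single fused loop: strip each token in place, return on exact match,
-- remember the first substring match in `subIdx`.
def pvScanB : List String → String → Int → Option Int → Int
  | [], _, _, subIdx => subIdx.getD (-1)  -- raise ValueError when subIdx is None; excluded by Pre_
  | t :: rest, tgt, i, subIdx =>
    let s := PySem.Str.replace (PySem.Str.lower t) "##" ""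
    if s = tgt then i
    else if subIdx.isNone ∧ PySem.Str.isIn tgt s then pvScanB rest tgt (i + 1) (some i)
    else pvScanB rest tgt (i + 1) subIdx

def find_token_index_alt (tokens : List String) (target : Option String) (default : String) : Int :=
  match target with
  | none => if default = "last" then (tokens.length : Int) - 1 else 0
  | some tg =>
    if tg = "" then (if default = "last" then (tokens.length : Int) - 1 else 0)
    else pvScanB tokens (PySem.Str.lower tg) 0 none

-- ===== PRECONDITION & SPEC =====
-- Pre_ excludes exactly the inputs on which A raises ValueError: a nonempty target whose
-- lowercase form is a substring of no stripped token.
def Pre_find_token_index (tokens : List String) (target : Option String) (default : String) : Prop :=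
  (match target with
   | none => true
   | some tg => (tg == "") ||
       tokens.any (fun t =>
         PySem.Str.isIn (PySem.Str.lower tg) (PySem.Str.replace (PySem.Str.lower t) "##" ""))) = true
instance (tokens : List String) (target : Option String) (default : String) : Decidable (Pre_find_token_index tokens target default) := by unfold Pre_find_token_index; infer_instance

def pvWitness_find_token_index : List String × Option String × String := (["hello", "##ing"], some "ING", "last")

def Spec_find_token_index (tokens : List String) (target : Option String) (default : String) (out : Int) : Prop := out = find_token_index_alt tokens target default
instance (tokens : List String) (target : Option String) (default : String) (out : Int) : Decidable (Spec_find_token_index tokens target default out) := by unfold Spec_find_token_index; infer_instance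

-- ===== CLAIM (what is proved, stated in full; the proofs are below) =====
def Claim_equal_find_token_index : Prop := ∀ (tokens : List String) (target : Option String) (default : String), Dom_find_token_index tokens target default → Pre_find_token_index tokens target default → Spec_find_token_index tokens target default (find_token_index tokens target default)

-- ===== LEMMAS AND PROOFS =====

-- loop fusion invariant: one pass of B equals A's two passes, threaded through the
-- recorded substring index `subIdx`.
theorem pvScanB_eq (l : List String) (tgt : String) :
    ∀ (i : Int) (subIdx : Option Int),
      pvScanB l tgt i subIdx =
        match pvScanEq (l.map pvStripA) tgt i with
        | some j => j
        | none =>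
          match subIdx with
          | some f => f
          | none => (pvScanIn (l.map pvStripA) tgt i).getD (-1) := by
  induction l with
  | nil => intro i subIdx; cases subIdx <;> simp [pvScanB, pvScanEq, pvScanIn]
  | cons t rest ih =>
    intro i subIdx
    simp only [pvScanB, List.map_cons, pvScanEq, pvScanIn, pvStripA]
    by_cases heq : PySem.Str.replace (PySem.Str.lower t) "##" "" = tgt
    · simp [heq]
    · simp only [heq, if_false]
      by_cases hin : PySem.Chars.isIn tgt.toList (PySem.Chars.replace (PySem.Chars.lower t.toList) ['#', '#'] []) = true
      · cases subIdx with
        | none => simp [hin, ih]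
        | some f => simp [hin, ih]
      · simp only [Bool.not_eq_true] at hin
        cases subIdx with
        | none => simp [hin, ih]
        | some f => simp [hin, ih]


-- ===== VERDICT (by name: the statement is the Claim_ definition above) =====
theorem find_token_index_spec : Claim_equal_find_token_index := by
  unfold Claim_equal_find_token_index
  intro tokens target default _ _
  unfold Spec_find_token_index find_token_index find_token_index_alt
  cases target with
  | none => rfl
  | some tg =>
    by_cases h0 : tg = ""
    · simp [h0]
    · simp only [h0, if_false]
      rw [pvScanB_eq]
      cases hE : pvScanEq (tokens.map pvStripA) (PySem.Str.lower tg) 0 <;>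
        cases hI : pvScanIn (tokens.map pvStripA) (PySem.Str.lower tg) 0 <;>
          simp
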